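-- pv_equiv track=rewrite | github.com/sauvik-d/sauvik-d | python_basics/nptel/DSA_using_python/w3q.py | sumsquare
-- ===== SOURCE A (Python) =====
-- def sumsquare(seq):
--     l = []
--     odd = 0
--     even = 0
--     for i in seq:
--         if i % 2 == 0:
--             even = even + (i**2)
--         else:
--             odd = odd + (i**2)
--     l.append(odd)
--     l.append(even)
--     return l
-- ===== SOURCE B (Python) =====
-- def sumsquare(seq):
--     # Accumulate the total sum of squares t and the parity-signed sum d
--     # (even squares count +, odd squares count -); then recover the two
--     # totals by the identity odd = (t - d) // 2, even = (t + d) // 2.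
--     t = 0
--     d = 0
--     for i in seq:
--         s = i * i
--         t += s
--         d += -s if i % 2 else s
--     return [(t - d) // 2, (t + d) // 2]
-- ===== Notes on version B (the rewrite author's own statement) =====
-- stated objective: alternative
-- what changed: Instead of two separate odd/even accumulators, B accumulates the total sum of squares and a parity-signed sum (even +, odd -) in one pass and recovers [odd, even] by the half-sum/half-difference identity odd=(t-d)//2, even=(t+d)//2.
import Mathlib
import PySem

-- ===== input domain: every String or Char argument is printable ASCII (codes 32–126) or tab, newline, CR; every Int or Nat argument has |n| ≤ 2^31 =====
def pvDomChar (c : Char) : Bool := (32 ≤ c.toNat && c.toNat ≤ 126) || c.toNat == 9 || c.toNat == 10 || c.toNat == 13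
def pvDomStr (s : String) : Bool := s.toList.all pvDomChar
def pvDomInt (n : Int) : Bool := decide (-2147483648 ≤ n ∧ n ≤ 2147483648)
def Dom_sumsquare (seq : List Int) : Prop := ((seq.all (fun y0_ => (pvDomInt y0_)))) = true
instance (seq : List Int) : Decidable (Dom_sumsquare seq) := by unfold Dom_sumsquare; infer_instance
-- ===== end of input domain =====

-- B computes the same pair via a total-plus-signed-sum identity instead of two parity accumulators (alternative algorithm, same cost).

-- ===== PORT A =====
-- literal port: one fold carrying (odd, even), branch order as in A
def sumsquare (seq : List Int) : List Int :=
  let p := seq.foldl (fun (st : Int × Int) i =>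
    if PySem.Int.mod i 2 == 0 then (st.1, st.2 + i ^ 2) else (st.1 + i ^ 2, st.2)) (0, 0)
  ([] : List Int) ++ [p.1] ++ [p.2]

-- ===== PORT B =====
-- one fold carrying (total, signed total), then the half-sum/half-difference identity, as in Source B
def sumsquare_alt (seq : List Int) : List Int :=
  let p := seq.foldl (fun (st : Int × Int) i =>
    let s := i * i
    (st.1 + s, st.2 + (if PySem.Int.mod i 2 != 0 then -s else s))) (0, 0)
  [PySem.Int.floordiv (p.1 - p.2) 2, PySem.Int.floordiv (p.1 + p.2) 2]

-- ===== PRECONDITION & SPEC =====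
def Spec_sumsquare (seq : List Int) (out : List Int) : Prop := out = sumsquare_alt seq
instance (seq : List Int) (out : List Int) : Decidable (Spec_sumsquare seq out) := by unfold Spec_sumsquare; infer_instance

-- ===== CLAIM (what is proved, stated in full; the proofs are below) =====
def Claim_equal_sumsquare : Prop := ∀ (seq : List Int), Dom_sumsquare seq → Spec_sumsquare seq (sumsquare seq)

-- ===== LEMMAS AND PROOFS =====

-- Invariant: B's fold from (o+e, e-o) tracks A's fold from (o, e).
theorem fold_pair (seq : List Int) (o e : Int) :
    seq.foldl (fun (st : Int × Int) i =>
      let s := i * i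
      (st.1 + s, st.2 + (if PySem.Int.mod i 2 != 0 then -s else s))) (o + e, e - o)
    = ((seq.foldl (fun (st : Int × Int) i =>
        if PySem.Int.mod i 2 == 0 then (st.1, st.2 + i ^ 2) else (st.1 + i ^ 2, st.2)) (o, e)).1
       + (seq.foldl (fun (st : Int × Int) i =>
        if PySem.Int.mod i 2 == 0 then (st.1, st.2 + i ^ 2) else (st.1 + i ^ 2, st.2)) (o, e)).2,
       (seq.foldl (fun (st : Int × Int) i =>
        if PySem.Int.mod i 2 == 0 then (st.1, st.2 + i ^ 2) else (st.1 + i ^ 2, st.2)) (o, e)).2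
       - (seq.foldl (fun (st : Int × Int) i =>
        if PySem.Int.mod i 2 == 0 then (st.1, st.2 + i ^ 2) else (st.1 + i ^ 2, st.2)) (o, e)).1) := by
  induction seq generalizing o e with
  | nil => simp
  | cons a t ih =>
    have hb : (PySem.Int.mod a 2 != 0) = !(PySem.Int.mod a 2 == 0) := rfl
    cases h : PySem.Int.mod a 2 == 0 <;>
      simp only [List.foldl_cons, hb, h, Bool.not_true, Bool.not_false, if_true, if_false,
        Bool.false_eq_true]
    · have e1 : o + e + a * a = (o + a ^ 2) + e := by ring
      have e2 : e - o + -(a * a) = e - (o + a ^ 2) := by ring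
      rw [e1, e2, ih]
    · have e1 : o + e + a * a = o + (e + a ^ 2) := by ring
      have e2 : e - o + a * a = (e + a ^ 2) - o := by ring
      rw [e1, e2, ih]

-- ===== VERDICT (by name: the statement is the Claim_ definition above) =====
theorem sumsquare_spec : Claim_equal_sumsquare := by
  intro seq _
  unfold Spec_sumsquare sumsquare sumsquare_alt
  have h0 : (0 : Int) + 0 = 0 + 0 := rfl
  have := fold_pair seq 0 0
  simp only [Int.add_zero, Int.sub_zero] at this ⊢
  rw [show ((0:Int),(0:Int)) = ((0:Int) + 0, (0:Int) - 0) by norm_num] at this ⊢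
  rw [this]
  set q := seq.foldl (fun (st : Int × Int) i =>
    if PySem.Int.mod i 2 == 0 then (st.1, st.2 + i ^ 2) else (st.1 + i ^ 2, st.2)) ((0:Int) + 0, (0:Int) - 0)
  have h1 : q.1 + q.2 - (q.2 - q.1) = q.1 + q.1 := by ring
  have h2 : q.1 + q.2 + (q.2 - q.1) = q.2 + q.2 := by ring
  simp [h1, h2]
  omega
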